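-- pv_equiv track=rewrite | github.com/Igrekess/PT_CHEMISTRY | ptc/lcao/atomic_basis.py | _slater_shell_occupations
-- ===== SOURCE A (Python) =====
-- def _slater_shell_occupations(Z: int) -> dict:
--     """Slater shell occupations for atom Z.
--
--     Returns a dict keyed on the Slater group label
--     ('1s', '2sp', '3sp', '3d', '4sp', '4d', '4f', '5sp', '5d', ...) →
--     integer electron count in that group. This follows Slater's
--     grouping convention where (ns, np) share a screening group and
--     (nd) is its own group.
--     """
--     # Walk Aufbau order until total = Z, populating each Slater group.
--     aufbau = [
--         ("1s", 2), ("2sp", 8), ("3sp", 8), ("3d", 10),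
--         ("4sp", 8), ("4d", 10), ("4f", 14),
--         ("5sp", 8), ("5d", 10), ("5f", 14),
--         ("6sp", 8), ("6d", 10), ("7sp", 8),
--     ]
--     out: dict = {}
--     remaining = Z
--     for label, cap in aufbau:
--         if remaining <= 0:
--             break
--         ne = min(remaining, cap)
--         out[label] = ne
--         remaining -= ne
--     return out
-- ===== SOURCE B (Python) =====
-- from itertools import accumulate
--
-- def _slater_shell_occupations(Z: int) -> dict:
--     """Slater shell occupations for atom Z (threshold-based direct computation)."""
--     aufbau = [
--         ("1s", 2), ("2sp", 8), ("3sp", 8), ("3d", 10),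
--         ("4sp", 8), ("4d", 10), ("4f", 14),
--         ("5sp", 8), ("5d", 10), ("5f", 14),
--         ("6sp", 8), ("6d", 10), ("7sp", 8),
--     ]
--     prefixes = [0] + list(accumulate(cap for _, cap in aufbau))[:-1]
--     return {label: min(cap, Z - p)
--             for (label, cap), p in zip(aufbau, prefixes)
--             if Z - p > 0}
-- ===== Notes on version B (the rewrite author's own statement) =====
-- stated objective: alternative
-- what changed: Replaces the mutable remaining-electrons accumulator with an early break by precomputed cumulative capacities (itertools.accumulate) and a direct dict comprehension ne = min(cap, Z - prefix) filtered on Z - prefix > 0.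
import Mathlib
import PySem

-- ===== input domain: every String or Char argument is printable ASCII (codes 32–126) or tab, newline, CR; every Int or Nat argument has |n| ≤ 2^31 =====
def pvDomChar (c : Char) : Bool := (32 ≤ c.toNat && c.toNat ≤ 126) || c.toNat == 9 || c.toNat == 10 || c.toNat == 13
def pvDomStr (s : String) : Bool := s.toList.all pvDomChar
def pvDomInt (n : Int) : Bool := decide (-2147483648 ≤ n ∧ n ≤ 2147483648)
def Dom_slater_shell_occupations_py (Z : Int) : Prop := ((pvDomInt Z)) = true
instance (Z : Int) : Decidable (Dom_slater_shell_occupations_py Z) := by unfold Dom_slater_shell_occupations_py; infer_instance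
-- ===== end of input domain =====

-- B drops A's mutable `remaining` accumulator and break, computing each group as min(cap, Z - prefix) from precomputed cumulative capacities; same values (alternative decomposition, no speed claim).

-- ===== PORT A =====
-- the Aufbau table shared by both programs (identical literal in Source A and Source B)
def pvAufbau : List (String × Int) :=
  [("1s", 2), ("2sp", 8), ("3sp", 8), ("3d", 10),
   ("4sp", 8), ("4d", 10), ("4f", 14),
   ("5sp", 8), ("5d", 10), ("5f", 14),
   ("6sp", 8), ("6d", 10), ("7sp", 8)]

-- A's for-loop with `remaining` and break; each label is fresh, so the dict insert is an append (modelled by cons in order)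
def pvALoop : List (String × Int) → Int → List (String × Int)
  | [], _ => []
  | (label, cap) :: t, remaining =>
    if remaining ≤ 0 then []
    else
      let ne := min remaining cap
      (label, ne) :: pvALoop t (remaining - ne)

def slater_shell_occupations_py (Z : Int) : List (String × Int) :=
  pvALoop pvAufbau Z

-- ===== PORT B =====
-- Source B: prefixes = [0] + accumulate(caps)[:-1]  (= scanl (+) 0 caps without its last element),
-- then a comprehension over zip(aufbau, prefixes) keeping min(cap, Z - p) when Z - p > 0
def slater_shell_occupations_py_alt (Z : Int) : List (String × Int) :=
  let prefixes : List Int := ((pvAufbau.map Prod.snd).scanl (· + ·) 0).dropLast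
  (pvAufbau.zip prefixes).filterMap (fun x =>
    if Z - x.2 > 0 then some (x.1.1, min x.1.2 (Z - x.2)) else none)

-- ===== PRECONDITION & SPEC =====
def Spec_slater_shell_occupations_py (Z : Int) (out : List (String × Int)) : Prop := out = slater_shell_occupations_py_alt Z
instance (Z : Int) (out : List (String × Int)) : Decidable (Spec_slater_shell_occupations_py Z out) := by unfold Spec_slater_shell_occupations_py; infer_instance

-- ===== CLAIM (what is proved, stated in full; the proofs are below) =====
def Claim_equal_slater_shell_occupations_py : Prop := ∀ (Z : Int), Dom_slater_shell_occupations_py Z → Spec_slater_shell_occupations_py Z (slater_shell_occupations_py Z)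

-- ===== LEMMAS AND PROOFS =====

-- B's comprehension shape over an arbitrary table, starting from prefix p
def pvBList (Z : Int) (t : List (String × Int)) (p : Int) : List (String × Int) :=
  (t.zip (((t.map Prod.snd).scanl (· + ·) p).dropLast)).filterMap (fun x =>
    if Z - x.2 > 0 then some (x.1.1, min x.1.2 (Z - x.2)) else none)

lemma pvBList_cons (Z p : Int) (l : String) (c : Int) (t : List (String × Int)) :
    pvBList Z ((l, c) :: t) p =
      (if Z - p > 0 then [(l, min c (Z - p))] else []) ++ pvBList Z t (p + c) := by
  unfold pvBList
  simp only [List.map_cons, List.scanl_cons]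
  have hne : ((t.map Prod.snd).scanl (· + ·) (p + c)) ≠ [] := by
    cases t <;> simp [List.scanl_cons]
  rw [List.dropLast_cons_of_ne_nil hne]
  simp [List.zip_cons_cons, List.filterMap_cons]
  split_ifs <;> simp

lemma pvBList_empty (Z : Int) (t : List (String × Int)) (p : Int)
    (hpos : ∀ x ∈ t, 0 < x.2) (h : Z ≤ p) : pvBList Z t p = [] := by
  induction t generalizing p with
  | nil => rfl
  | cons x t ih =>
    obtain ⟨l, c⟩ := x
    rw [pvBList_cons]
    have hc : 0 < c := hpos (l, c) (by simp)
    rw [if_neg (by omega), ih (p + c) (fun y hy => hpos y (List.mem_cons_of_mem _ hy)) (by omega)]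
    rfl

lemma pvALoop_eq_pvBList (Z : Int) (t : List (String × Int)) (p : Int)
    (hpos : ∀ x ∈ t, 0 < x.2) : pvALoop t (Z - p) = pvBList Z t p := by
  induction t generalizing p with
  | nil => rfl
  | cons x t ih =>
    obtain ⟨l, c⟩ := x
    have hc : 0 < c := hpos (l, c) (by simp)
    have hpos' : ∀ y ∈ t, 0 < y.2 := fun y hy => hpos y (by simp [hy])
    rw [pvBList_cons]
    unfold pvALoop
    by_cases h : Z - p ≤ 0
    · rw [if_pos h, if_neg (by omega), pvBList_empty Z t (p + c) hpos' (by omega)]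
      rfl
    · rw [if_neg h, if_pos (by omega)]
      simp only [List.singleton_append]
      have hmin : min (Z - p) c = min c (Z - p) := min_comm _ _
      rw [hmin]
      congr 1
      by_cases hcap : Z - p ≤ c
      · have h0 : Z - p - min c (Z - p) = Z - Z := by omega
        rw [h0, ih Z hpos', pvBList_empty Z t Z hpos' le_rfl,
            pvBList_empty Z t (p + c) hpos' (by omega)]
      · have h0 : Z - p - min c (Z - p) = Z - (p + c) := by omega
        rw [h0]
        exact ih (p + c) hpos'

-- ===== VERDICT (by name: the statement is the Claim_ definition above) =====
theorem slater_shell_occupations_py_spec : Claim_equal_slater_shell_occupations_py := by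
  intro Z _
  show slater_shell_occupations_py Z = slater_shell_occupations_py_alt Z
  have h : slater_shell_occupations_py_alt Z = pvBList Z pvAufbau 0 := rfl
  rw [h, ← pvALoop_eq_pvBList Z pvAufbau 0 (by decide)]
  show pvALoop pvAufbau Z = pvALoop pvAufbau (Z - 0)
  rw [Int.sub_zero]
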